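-- pv_equiv track=rewrite | github.com/SFame/FlowLab | Assets/Resources/PUMP/Py/ScriptngPrac/8-bit-CPU.py | sub_8bit
-- ===== SOURCE A (Python) =====
-- def sub_8bit(a, b):
--     result = [False] * 8
--     borrow = False
--
--     for i in range(7, -1, -1):
--         # 1비트 뺄셈 수행
--         diff_bit = (a[i] != b[i]) != borrow
--         next_borrow = (not a[i] and b[i]) or (not a[i] and borrow) or (b[i] and borrow)
--
--         result[i] = diff_bit
--         borrow = next_borrow
--
--     return result, borrow
-- ===== SOURCE B (Python) =====
-- def sub_8bit(a, b):
--     A = 0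
--     B = 0
--     for i in range(8):
--         A = A * 2 + (1 if a[i] else 0)
--         B = B * 2 + (1 if b[i] else 0)
--     borrow = A < B
--     m = (A - B) % 256
--     bits = []
--     for _ in range(8):
--         bits.append(m % 2 == 1)
--         m = m // 2
--     bits.reverse()
--     return bits, borrow
-- ===== Notes on version B (the rewrite author's own statement) =====
-- stated objective: alternative
-- what changed: Replaces the per-bit ripple-borrow loop with integer arithmetic: pack both bit lists into 8-bit integers, take the difference mod 256 and unpack its bits, with borrow = A < B.
import Mathlib
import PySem

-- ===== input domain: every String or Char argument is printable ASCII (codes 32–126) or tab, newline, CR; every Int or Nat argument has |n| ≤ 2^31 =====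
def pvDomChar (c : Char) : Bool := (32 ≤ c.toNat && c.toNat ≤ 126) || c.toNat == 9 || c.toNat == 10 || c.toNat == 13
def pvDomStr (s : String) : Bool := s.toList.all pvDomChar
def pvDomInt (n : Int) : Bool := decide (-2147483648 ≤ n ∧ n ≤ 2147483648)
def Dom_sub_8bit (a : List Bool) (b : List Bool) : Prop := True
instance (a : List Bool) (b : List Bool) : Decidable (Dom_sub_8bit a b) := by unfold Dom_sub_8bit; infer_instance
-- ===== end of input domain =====

-- B replaces A's per-bit ripple-borrow loop by integer arithmetic: build the two 8-bit values,
-- subtract mod 256 and read the bits back (objective: alternative algorithm, similar cost).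

-- ===== PORT A =====
def sub_8bit (a : List Bool) (b : List Bool) : List Bool × Bool :=
  let init : List Bool × Bool := (List.replicate 8 false, false)
  (PySem.List.pyRange 7 (-1) (-1)).foldl (fun st i =>
    let ai := PySem.List.pyGetD a i false
    let bi := PySem.List.pyGetD b i false
    let diff_bit := (ai != bi) != st.2
    let next_borrow := (!ai && bi) || (!ai && st.2) || (bi && st.2)
    (PySem.List.pySetD st.1 i diff_bit, next_borrow)) init

-- ===== PORT B =====
def sub_8bit_alt (a : List Bool) (b : List Bool) : List Bool × Bool :=
  let AB : Int × Int := (PySem.List.pyRange 0 8 1).foldl (fun AB i =>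
    (AB.1 * 2 + (if PySem.List.pyGetD a i false then 1 else 0),
     AB.2 * 2 + (if PySem.List.pyGetD b i false then 1 else 0))) (0, 0)
  let borrow := AB.1 < AB.2
  let m := PySem.Int.mod (AB.1 - AB.2) 256
  let bm : List Bool × Int := (PySem.List.pyRange 0 8 1).foldl (fun bm _ =>
    (bm.1 ++ [PySem.Int.mod bm.2 2 == 1], PySem.Int.floordiv bm.2 2)) ([], m)
  (bm.1.reverse, decide borrow)

-- ===== PRECONDITION & SPEC =====
-- Pre_ excludes exactly the inputs where A raises IndexError: a list with fewer than 8 elements.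
def Pre_sub_8bit (a : List Bool) (b : List Bool) : Prop := 8 ≤ a.length ∧ 8 ≤ b.length
instance (a : List Bool) (b : List Bool) : Decidable (Pre_sub_8bit a b) := by unfold Pre_sub_8bit; infer_instance
def pvWitness_sub_8bit : List Bool × List Bool :=
  ([true, false, true, false, true, false, true, false],
   [false, true, true, false, false, true, false, true])
def Spec_sub_8bit (a : List Bool) (b : List Bool) (out : List Bool × Bool) : Prop := out = sub_8bit_alt a b
instance (a : List Bool) (b : List Bool) (out : List Bool × Bool) : Decidable (Spec_sub_8bit a b out) := by unfold Spec_sub_8bit; infer_instance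

-- ===== CLAIM (what is proved, stated in full; the proofs are below) =====
def Claim_equal_sub_8bit : Prop := ∀ (a : List Bool) (b : List Bool), Dom_sub_8bit a b → Pre_sub_8bit a b → Spec_sub_8bit a b (sub_8bit a b)

-- ===== LEMMAS AND PROOFS =====

def bv (x : Bool) : Int := if x then 1 else 0

def vLSB : List Bool → Int
  | [] => 0
  | x :: xs => bv x + 2 * vLSB xs

def bits : Nat → Int → List Bool
  | 0, _ => []
  | n + 1, m => (PySem.Int.mod m 2 == 1) :: bits n (PySem.Int.floordiv m 2)

def divIter : Nat → Int → Int
  | 0, m => m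
  | n + 1, m => divIter n (PySem.Int.floordiv m 2)

def ripple : List (Bool × Bool) → Bool → List Bool × Bool
  | [], c => ([], c)
  | (x, y) :: tl, c =>
    let d := (x != y) != c
    let c' := (!x && y) || (!x && c) || (y && c)
    let r := ripple tl c'
    (d :: r.1, r.2)

theorem pySetD_ofNat (xs : List Bool) (n : Nat) (v : Bool) (h : n < xs.length) :
    PySem.List.pySetD xs (↑n) v = xs.set n v := by
  simp [PySem.List.pySetD, PySem.List.pySet?, PySem.List.pyIdx?, h]

-- step identity for one full-subtractor bit
theorem bit_step (x y c : Bool) :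
    bv x - bv y - bv c + 2 * bv ((!x && y) || (!x && c) || (y && c)) = bv ((x != y) != c) := by
  cases x <;> cases y <;> cases c <;> decide

theorem ripple_spec (ps : List (Bool × Bool)) (c : Bool) :
    ripple ps c
    = (bits ps.length (PySem.Int.mod (vLSB (ps.map Prod.fst) - vLSB (ps.map Prod.snd) - bv c) (2 ^ ps.length)),
       decide (vLSB (ps.map Prod.fst) - vLSB (ps.map Prod.snd) - bv c < 0)) := by
  induction ps generalizing c with
  | nil => cases c <;> simp [ripple, bits, vLSB, bv]
  | cons p tl ih =>
    obtain ⟨x, y⟩ := p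
    have key := bit_step x y c
    show (((x != y) != c) :: (ripple tl ((!x && y) || (!x && c) || (y && c))).1,
          (ripple tl ((!x && y) || (!x && c) || (y && c))).2) = _
    rw [ih]
    simp only [List.map_cons, vLSB, List.length_cons]
    set vA := vLSB (tl.map Prod.fst) with hvA
    set vB := vLSB (tl.map Prod.snd) with hvB
    set c' := (!x && y) || (!x && c) || (y && c) with hc'
    set d := (x != y) != c with hd
    set S' : Int := vA - vB - bv c' with hS'
    have hS : bv x + 2 * vA - (bv y + 2 * vB) - bv c = bv d + 2 * S' := by omega
    simp only [← hvA, ← hvB]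
    simp only [hS]
    have hK : (0:Int) < 2 ^ tl.length := by positivity
    have hbd : bv d = 0 ∨ bv d = 1 := by cases d <;> simp [bv]
    have hmod1 : 0 ≤ S' % 2 ^ tl.length := Int.emod_nonneg _ (by omega)
    have hmod2 : S' % 2 ^ tl.length < 2 ^ tl.length := Int.emod_lt_of_pos _ hK
    have hM : (bv d + 2 * S') % 2 ^ (tl.length + 1) = bv d + 2 * (S' % 2 ^ tl.length) := by
      have h1 : bv d + 2 * S' = (bv d + 2 * (S' % 2 ^ tl.length)) + (2 ^ (tl.length + 1)) * (S' / 2 ^ tl.length) := by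
        have h2 := Int.emod_add_mul_ediv S' (2 ^ tl.length)
        rw [pow_succ]
        ring_nf
        ring_nf at h2
        omega
      rw [h1, Int.add_mul_emod_self_left, Int.emod_eq_of_lt (by omega) (by rw [pow_succ]; omega)]
    rw [Prod.mk.injEq]
    refine ⟨?_, ?_⟩
    · rw [show PySem.Int.mod (bv d + 2 * S') (2 ^ (tl.length + 1))
            = (bv d + 2 * S') % 2 ^ (tl.length + 1) from PySem.Int.mod_eq_emod_of_pos (by positivity), hM]
      show _ = ((PySem.Int.mod (bv d + 2 * (S' % 2 ^ tl.length)) 2 == 1)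
                 :: bits tl.length (PySem.Int.floordiv (bv d + 2 * (S' % 2 ^ tl.length)) 2))
      congr 1
      · rw [PySem.Int.mod_eq_emod_of_pos (by omega)]
        rcases hbd with h | h
        · have hd0 : d = false := by revert h; cases d <;> simp [bv]
          have hx : (bv d + 2 * (S' % 2 ^ tl.length)) % 2 = 0 := by omega
          rw [hx, hd0]
          decide
        · have hd1 : d = true := by revert h; cases d <;> simp [bv]
          have hx : (bv d + 2 * (S' % 2 ^ tl.length)) % 2 = 1 := by omega
          rw [hx, hd1]
          decide
      · congr 1
        rw [PySem.Int.mod_eq_emod_of_pos hK, PySem.Int.floordiv_eq_ediv_of_pos (by omega)]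
        omega
    · show decide (S' < 0) = decide (bv d + 2 * S' < 0)
      rcases hbd with h | h <;> rw [h] <;> congr 1 <;> simp <;> omega

theorem loopBits (l : List Int) (acc : List Bool) (m : Int) :
    List.foldl (fun (bm : List Bool × Int) (_ : Int) =>
        (bm.1 ++ [PySem.Int.mod bm.2 2 == 1], PySem.Int.floordiv bm.2 2)) (acc, m) l
    = (acc ++ bits l.length m, divIter l.length m) := by
  induction l generalizing acc m with
  | nil => simp [bits, divIter]
  | cons hd tl ih =>
    simp only [List.foldl_cons, ih, List.length_cons]
    simp [bits, divIter, List.append_assoc]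

def idxDesc : Nat → List Int
  | 0 => []
  | n + 1 => (n : Int) :: idxDesc n

theorem loopA (n : Nat) : ∀ (a b res : List Bool) (c : Bool), n ≤ a.length → n ≤ b.length → n ≤ res.length →
    List.foldl (fun (st : List Bool × Bool) (i : Int) =>
        (PySem.List.pySetD st.1 i ((PySem.List.pyGetD a i false != PySem.List.pyGetD b i false) != st.2),
         (!PySem.List.pyGetD a i false && PySem.List.pyGetD b i false)
           || (!PySem.List.pyGetD a i false && st.2) || (PySem.List.pyGetD b i false && st.2)))
      (res, c) (idxDesc n)
    = ((ripple (((a.zip b).take n).reverse) c).1.reverse ++ res.drop n,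
       (ripple (((a.zip b).take n).reverse) c).2) := by
  induction n with
  | zero => intro a b res c _ _ _; simp [ripple, idxDesc]
  | succ n ih =>
    intro a b res c ha hb hres
    rw [show idxDesc (n + 1) = (n : Int) :: idxDesc n from rfl, List.foldl_cons]
    rw [PySem.List.pyGetD_ofNat a n false (by omega), PySem.List.pyGetD_ofNat b n false (by omega),
        pySetD_ofNat res n _ (by omega)]
    rw [ih a b _ _ (by omega) (by omega) (by simp; omega)]
    have hzip : ((a.zip b).take (n+1)).reverse = (a[n]'(by omega), b[n]'(by omega)) :: ((a.zip b).take n).reverse := by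
      rw [List.take_succ, List.getElem?_eq_getElem (by simp [List.length_zip]; omega)]
      simp [List.getElem_zip]
    rw [hzip]
    show _ = ((_ :: (ripple (((a.zip b).take n).reverse) _).1).reverse ++ _, _)
    rw [List.reverse_cons]
    have hdrop : (res.set n ((a[n]'(by omega) != b[n]'(by omega)) != c)).drop n
        = ((a[n]'(by omega) != b[n]'(by omega)) != c) :: res.drop (n+1) := by
      rw [List.drop_eq_getElem_cons (by simp; omega)]
      congr 1
      · simp
      · simp [List.drop_set]
    rw [hdrop]
    simp [List.append_assoc]
    simp [ripple]


theorem loopAB (n : Nat) (a b : List Bool) (A0 B0 : Int) (ha : n ≤ a.length) (hb : n ≤ b.length) :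
    List.foldl (fun (AB : Int × Int) (i : Int) =>
        (AB.1 * 2 + (if PySem.List.pyGetD a i false then 1 else 0),
         AB.2 * 2 + (if PySem.List.pyGetD b i false then 1 else 0))) (A0, B0)
        ((List.range n).map (Nat.cast : Nat → Int))
    = (A0 * 2 ^ n + vLSB ((a.take n).reverse), B0 * 2 ^ n + vLSB ((b.take n).reverse)) := by
  induction n generalizing A0 B0 with
  | zero => simp [vLSB]
  | succ n ih =>
    rw [List.range_succ, List.map_append, List.foldl_append, ih A0 B0 (by omega) (by omega)]
    simp only [List.map_cons, List.map_nil, List.foldl_cons, List.foldl_nil]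
    rw [PySem.List.pyGetD_ofNat a n false (by omega), PySem.List.pyGetD_ofNat b n false (by omega)]
    rw [List.take_succ, List.take_succ,
        List.getElem?_eq_getElem (by omega : n < a.length),
        List.getElem?_eq_getElem (by omega : n < b.length)]
    simp only [Option.toList_some, List.reverse_append, List.reverse_cons, List.reverse_nil,
      List.nil_append, List.cons_append, vLSB]
    rw [Prod.mk.injEq]
    constructor <;> (simp only [bv]; ring)

theorem main_eq (a b : List Bool) (ha : 8 ≤ a.length) (hb : 8 ≤ b.length) :
    sub_8bit a b = sub_8bit_alt a b := by
  have hr1 : PySem.List.pyRange 7 (-1) (-1) = idxDesc 8 := by decide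
  have hr2 : PySem.List.pyRange 0 8 1 = (List.range 8).map (Nat.cast : Nat → Int) := by decide
  have hlen8 : (((a.zip b).take 8).reverse).length = 8 := by
    simp [List.length_zip]; omega
  have hfst : (((a.zip b).take 8).reverse).map Prod.fst = (a.take 8).reverse := by
    apply List.ext_getElem
    · simp [List.length_zip]; omega
    · intro i h1 h2
      simp [List.getElem_reverse, List.getElem_zip, List.length_zip]
      congr 1
      omega
  have hsnd : (((a.zip b).take 8).reverse).map Prod.snd = (b.take 8).reverse := by
    apply List.ext_getElem
    · simp [List.length_zip]; omega
    · intro i h1 h2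
      simp [List.getElem_reverse, List.getElem_zip, List.length_zip]
      congr 1
      omega
  simp only [sub_8bit, sub_8bit_alt]
  rw [hr1, hr2]
  rw [loopA 8 a b (List.replicate 8 false) false ha hb (by simp)]
  rw [loopAB 8 a b 0 0 ha hb]
  rw [loopBits]
  rw [ripple_spec, hlen8, hfst, hsnd]
  simp only [List.nil_append, List.length_map, List.length_range]
  norm_num [bv]

-- ===== VERDICT (by name: the statement is the Claim_ definition above) =====
theorem sub_8bit_spec : Claim_equal_sub_8bit := by
  intro a b _ hpre
  show sub_8bit a b = sub_8bit_alt a b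
  exact main_eq a b hpre.1 hpre.2
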